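-- pv_equiv track=rewrite | github.com/MastewalB/a2sv-competitive-programming | Contest/Camp-Contest/C-7/F.py | minDigit
-- ===== SOURCE A (Python) =====
-- def can(m, s):
--     return 0 <= s <= 9 * m
--
-- def minDigit(m, s):
--     res = []
--
--     for i in range(m):
--         for d in range(10):
--             if (i > 0 or d > 0 or (m == 1 and d == 0)) and can(m - i - 1, s - d):
--                 res.append(str(d))
--                 s -= d
--                 break
--     if len(res) != m:
--         return -1
--     return ''.join(res)
-- ===== SOURCE B (Python) =====
-- def minDigit(m, s):
--     if m == 0:
--         return ""
--     if m == 1: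
--         return str(s) if 0 <= s <= 9 else -1
--     if s < 1 or s > 9 * m:
--         return -1
--     nines, rem = divmod(s - 1, 9)
--     if nines >= m - 1:
--         return str(1 + rem) + '9' * (m - 1)
--     if rem == 0:
--         return '1' + '0' * (m - 1 - nines) + '9' * nines
--     return '1' + '0' * (m - 2 - nines) + str(rem) + '9' * nines
-- ===== Notes on version B (the rewrite author's own statement) =====
-- stated objective: faster
-- what changed: A builds the answer digit by digit, scanning candidate digits 0..9 with a feasibility check at each of the m positions; B computes the answer in closed form from one divmod of s-1 by 9 (leading digit, a block of zeros, a remainder digit, a block of nines), built with C-level string repetition.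
-- outside the precondition, e.g. on minDigit(2, 0): A returns -1, B returns -1; on minDigit(3, 99): A returns -1, B returns -1
import Mathlib
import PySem

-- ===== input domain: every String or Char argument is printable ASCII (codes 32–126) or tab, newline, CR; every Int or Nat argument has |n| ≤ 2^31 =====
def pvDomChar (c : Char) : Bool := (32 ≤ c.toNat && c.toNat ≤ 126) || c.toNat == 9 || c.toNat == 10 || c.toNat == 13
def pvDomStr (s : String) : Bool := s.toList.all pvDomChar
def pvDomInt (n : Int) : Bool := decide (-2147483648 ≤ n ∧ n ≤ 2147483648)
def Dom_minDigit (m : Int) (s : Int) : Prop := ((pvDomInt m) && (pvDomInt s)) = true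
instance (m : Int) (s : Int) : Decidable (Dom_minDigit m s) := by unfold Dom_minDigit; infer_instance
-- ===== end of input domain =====

-- B replaces A's left-to-right per-position 0..9 greedy search by a closed-form digit-count
-- computation (one divmod); equal to A wherever A returns a string (measurably faster in Python).

-- ===== PORT A =====
-- can(m, s)
def pvCan (m : Int) (s : Int) : Bool := decide (0 ≤ s) && decide (s ≤ 9 * m)

-- the inner 'for d in range(10): if …: break' — first accepted d, none if no break happened
def pvFindD (m : Int) (i : Int) (s : Int) : List Int → Option Int
  | [] => none
  | d :: ds =>
    if ((decide (0 < i) || decide (0 < d) || (decide (m = 1) && decide (d = 0)))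
        && pvCan (m - i - 1) (s - d)) = true
    then some d else pvFindD m i s ds

-- the outer 'for i in range(m)' carrying (res, s)
def pvLoopA (m : Int) : List Int → List String × Int → List String × Int
  | [], st => st
  | i :: is, (res, s) =>
    match pvFindD m i s (PySem.List.pyRange 0 10 1) with
    | some d => pvLoopA m is (res ++ [PySem.Int.toStr d], s - d)
    | none => pvLoopA m is (res, s)

def minDigit (m : Int) (s : Int) : String :=
  let st := pvLoopA m (PySem.List.pyRange 0 m 1) ([], s)
  -- Python returns -1 (an int, not a str) when len(res) != m; those inputs are outside Pre_minDigit
  if (PySem.List.len st.1) ≠ m then "" else PySem.Str.join "" st.1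

-- ===== PORT B =====
def minDigit_alt (m : Int) (s : Int) : String :=
  if m = 0 then ""
  else if m = 1 then
    (if 0 ≤ s ∧ s ≤ 9 then PySem.Int.toStr s else "")  -- Python returns -1 on the else; outside Pre_minDigit
  else if s < 1 ∨ 9 * m < s then ""  -- Python returns -1 here; outside Pre_minDigit
  else
    let nines := PySem.Int.floordiv (s - 1) 9
    let rem := PySem.Int.mod (s - 1) 9
    -- '9' * k  is ported by hand as String.ofList (List.replicate k '9')  (exact: repetition of one char)
    if m - 1 ≤ nines then
      PySem.Int.toStr (1 + rem) ++ String.ofList (List.replicate (m - 1).toNat '9')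
    else if rem = 0 then
      "1" ++ String.ofList (List.replicate (m - 1 - nines).toNat '0')
          ++ String.ofList (List.replicate nines.toNat '9')
    else
      "1" ++ String.ofList (List.replicate (m - 2 - nines).toNat '0')
          ++ PySem.Int.toStr rem ++ String.ofList (List.replicate nines.toNat '9')

-- ===== PRECONDITION & SPEC =====
-- Pre_ excludes exactly the inputs on which Python A returns -1 (an int, not a value of the
-- declared str return type): the infeasible (m, s), i.e. all but m=0, m=1 with 0≤s≤9, m≥2 with 1≤s≤9m.
def Pre_minDigit (m : Int) (s : Int) : Prop :=
  m = 0 ∨ (m = 1 ∧ 0 ≤ s ∧ s ≤ 9) ∨ (2 ≤ m ∧ 1 ≤ s ∧ s ≤ 9 * m)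
instance (m : Int) (s : Int) : Decidable (Pre_minDigit m s) := by unfold Pre_minDigit; infer_instance
def pvWitness_minDigit : Int × Int := (3, 11)

def Spec_minDigit (m : Int) (s : Int) (out : String) : Prop := out = minDigit_alt m s
instance (m : Int) (s : Int) (out : String) : Decidable (Spec_minDigit m s out) := by unfold Spec_minDigit; infer_instance

-- ===== CLAIM (what is proved, stated in full; the proofs are below) =====
def Claim_equal_minDigit : Prop := ∀ (m : Int) (s : Int), Dom_minDigit m s → Pre_minDigit m s → Spec_minDigit m s (minDigit m s)

-- ===== LEMMAS AND PROOFS =====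

theorem pvRange10 : PySem.List.pyRange 0 10 1 = [0,1,2,3,4,5,6,7,8,9] := by decide

-- the inner search at a position i ≥ 1 picks the smallest feasible digit, a closed form
theorem pvFindD_pos (m i s : Int) (h1 : 1 ≤ i) (h4 : i < m) (h2 : 0 ≤ s) (h3 : s ≤ 9 * (m - i)) :
    pvFindD m i s (PySem.List.pyRange 0 10 1) = some (max 0 (s - 9 * (m - i - 1))) := by
  rw [pvRange10]
  simp only [pvFindD, pvCan, Bool.and_eq_true, Bool.or_eq_true, decide_eq_true_eq]
  split_ifs <;> (congr 1) <;> omega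

-- the inner search at position 0 (m ≥ 2) picks the smallest feasible nonzero digit
theorem pvFindD_zero (m s : Int) (hm : 2 ≤ m) (h1 : 1 ≤ s) (h2 : s ≤ 9 * m) :
    pvFindD m 0 s (PySem.List.pyRange 0 10 1) = some (max 1 (s - 9 * (m - 1))) := by
  rw [pvRange10]
  simp only [pvFindD, pvCan, Bool.and_eq_true, Bool.or_eq_true, decide_eq_true_eq]
  split_ifs <;> (congr 1) <;> omega

-- what A's loop appends over positions 1..m-1, as a function of the remaining sum
def pvTail : Nat → Int → List String
  | 0, _ => []
  | k+1, s => PySem.Int.toStr (max 0 (s - 9 * (k : Int))) :: pvTail k (s - max 0 (s - 9 * (k : Int)))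

theorem pvTail_length : ∀ (k : Nat) (s : Int), (pvTail k s).length = k
  | 0, _ => rfl
  | k+1, s => by simp [pvTail, pvTail_length k]

-- A's loop over range(i, m) with 1 ≤ i and invariant 0 ≤ s ≤ 9·(m−i) appends pvTail and drains s
theorem pvLoopA_mid (k : Nat) : ∀ (m i s : Int) (res : List String), i = m - k → 1 ≤ i →
    0 ≤ s → s ≤ 9 * k →
    pvLoopA m (PySem.List.pyRange i m 1) (res, s) = (res ++ pvTail k s, 0) := by
  induction k with
  | zero =>
    intro m i s res hi h1 h2 h3
    rw [PySem.List.pyRange_one_eq_nil (by omega)]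
    simp only [pvLoopA, pvTail, List.append_nil]
    exact Prod.ext rfl (by omega)
  | succ k ih =>
    intro m i s res hi h1 h2 h3
    rw [PySem.List.pyRange_one_cons (by omega : i < m)]
    simp only [pvLoopA]
    rw [pvFindD_pos m i s h1 (by omega) h2 (by push_cast at hi ⊢; omega)]
    have hk : m - i - 1 = (k : Int) := by push_cast at hi ⊢; omega
    rw [hk]
    show pvLoopA m (PySem.List.pyRange (i+1) m) (res ++ [PySem.Int.toStr (max 0 (s - 9 * (k:Int)))], s - max 0 (s - 9 * (k:Int))) = _
    rw [ih m (i+1) (s - max 0 (s - 9 * (k:Int))) (res ++ [PySem.Int.toStr (max 0 (s - 9 * (k:Int)))])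
        (by push_cast at hi ⊢; omega) (by omega) (by omega) (by push_cast at h3 ⊢; omega)]
    simp [pvTail]

theorem pvJoinNilFlatten : ∀ css : List (List Char), PySem.Chars.join [] css = css.flatten
  | [] => PySem.Chars.join_nil []
  | [p] => by rw [PySem.Chars.join_singleton]; simp
  | p :: q :: rest => by
      rw [PySem.Chars.join_cons_cons, pvJoinNilFlatten (q :: rest)]; simp

-- closed form of pvTail: zeros, then the remainder digit, then full nines
theorem pvTail_closed : ∀ (k : Nat) (s : Int), 0 ≤ s → s ≤ 9 * k →
    pvTail k s = if s % 9 = 0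
      then List.replicate (k - (s / 9).toNat) "0" ++ List.replicate (s / 9).toNat "9"
      else List.replicate (k - 1 - (s / 9).toNat) "0" ++
             PySem.Int.toStr (s % 9) :: List.replicate (s / 9).toNat "9" := by
  intro k
  induction k with
  | zero =>
    intro s h1 h2
    have hs : s = 0 := by omega
    subst hs
    simp [pvTail]
  | succ k ih =>
    intro s h1 h2
    by_cases hc : s ≤ 9 * k
    · have hd : max 0 (s - 9 * (k:Int)) = 0 := by omega
      have hrec : pvTail (k+1) s = PySem.Int.toStr 0 :: pvTail k s := by
        simp only [pvTail, hd]; norm_num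
      rw [hrec, ih s h1 hc]
      have h00 : PySem.Int.toStr 0 = "0" := by decide
      split_ifs with h9
      · rw [show (k+1) - (s/9).toNat = (k - (s/9).toNat) + 1 by omega]
        simp [List.replicate_succ, h00]
      · rw [show (k+1) - 1 - (s/9).toNat = (k - 1 - (s/9).toNat) + 1 by omega]
        simp [List.replicate_succ, h00]
    · have hd : max 0 (s - 9 * (k:Int)) = s - 9 * k := by omega
      have hnn : s - (s - 9 * (k:Int)) = 9 * k := by ring
      have hrec : pvTail (k+1) s = PySem.Int.toStr (s - 9 * (k:Int)) :: pvTail k (9 * k) := by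
        simp only [pvTail, hd, hnn]
      have e0 : (9 * (k:Int)) % 9 = 0 := by omega
      have e1 : ((9 * (k:Int)) / 9).toNat = k := by omega
      rw [hrec, ih (9 * k) (by positivity) (le_refl _), if_pos e0, e1]
      simp only [Nat.sub_self, List.replicate_zero, List.nil_append]
      split_ifs with h9
      · have hs9 : s - 9 * (k:Int) = 9 := by omega
        have he : (s / 9).toNat = k + 1 := by omega
        rw [hs9, he]
        simp [List.replicate_succ, show PySem.Int.toStr 9 = "9" from by decide]
      · have he : (s / 9).toNat = k := by omega
        have hs9 : s - 9 * (k:Int) = s % 9 := by omega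
        rw [hs9, he]
        simp

-- the m = 0 case: empty loop, empty string on both sides
theorem pvMain0 (s : Int) : minDigit 0 s = minDigit_alt 0 s := by
  unfold minDigit minDigit_alt
  rw [PySem.List.pyRange_one_eq_nil (le_refl 0)]
  simp [pvLoopA, PySem.List.len_eq]
  decide

-- the m ≥ 2 case
theorem pvMain2 (m s : Int) (hm : 2 ≤ m) (h1 : 1 ≤ s) (h2 : s ≤ 9 * m) :
    minDigit m s = minDigit_alt m s := by
  have hkc : (((m-1).toNat : Int)) = m - 1 := by omega
  unfold minDigit
  rw [PySem.List.pyRange_one_cons (by omega : (0:Int) < m)]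
  simp only [pvLoopA]
  rw [pvFindD_zero m s hm h1 h2, show (0:Int) + 1 = 1 from rfl]
  show (if PySem.List.len (pvLoopA m (PySem.List.pyRange 1 m) ([] ++ [PySem.Int.toStr (max 1 (s - 9 * (m - 1)))], s - max 1 (s - 9 * (m - 1)))).1 ≠ m then ""
        else PySem.Str.join "" (pvLoopA m (PySem.List.pyRange 1 m) ([] ++ [PySem.Int.toStr (max 1 (s - 9 * (m - 1)))], s - max 1 (s - 9 * (m - 1)))).1) = minDigit_alt m s
  simp only [List.nil_append]
  rw [pvLoopA_mid (m-1).toNat m 1 (s - max 1 (s - 9 * (m - 1))) [PySem.Int.toStr (max 1 (s - 9 * (m - 1)))]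
      (by omega) (le_refl 1) (by omega) (by rw [hkc]; omega)]
  simp only [List.singleton_append]
  have hlen : (PySem.List.len (PySem.Int.toStr (max 1 (s - 9 * (m - 1))) :: pvTail (m-1).toNat (s - max 1 (s - 9 * (m - 1))))) = m := by
    rw [PySem.List.len_eq]
    simp [pvTail_length]
    omega
  rw [if_neg (by rw [hlen]; omega)]
  -- B side
  unfold minDigit_alt
  rw [if_neg (by omega), if_neg (by omega), if_neg (by omega)]
  simp only [PySem.Int.floordiv_eq_ediv_of_pos (by norm_num : (0:Int) < 9),
             PySem.Int.mod_eq_emod_of_pos (by norm_num : (0:Int) < 9)]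
  apply String.toList_inj.mp
  rw [pvTail_closed (m-1).toNat (s - max 1 (s - 9 * (m - 1))) (by omega) (by rw [hkc]; omega)]
  by_cases hbig : 1 ≤ s - 9 * (m - 1)
  · -- leading digit absorbs the overflow; tail is all nines
    have hd0 : max 1 (s - 9 * (m - 1)) = s - 9 * (m - 1) := by omega
    have hs' : s - max 1 (s - 9 * (m - 1)) = 9 * (m - 1) := by omega
    have hmod : (9 * (m - 1)) % 9 = 0 := by omega
    have hdiv : ((9 * (m - 1)) / 9).toNat = (m-1).toNat := by omega
    rw [hs', if_pos hmod, hdiv]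
    simp only [Nat.sub_self, List.replicate_zero, List.nil_append]
    rw [if_pos (by omega : m - 1 ≤ (s-1) / 9)]
    have hrem : 1 + (s - 1) % 9 = max 1 (s - 9 * (m - 1)) := by omega
    rw [hrem]
    simp only [String.toList_append, PySem.Str.toList_join, String.toList_empty,
               pvJoinNilFlatten, List.map_cons, List.map_replicate, List.flatten_cons,
               String.toList_ofList, show ("9" : String).toList = ['9'] from by decide,
               List.flatten_replicate_singleton]
  · -- leading digit is 1; the tail carries s - 1
    have hd0 : max 1 (s - 9 * (m - 1)) = 1 := by omega
    rw [hd0]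
    rw [if_neg (by omega : ¬ (m - 1 ≤ (s-1) / 9))]
    simp only [PySem.Str.toList_join, String.toList_empty, pvJoinNilFlatten, List.map_cons,
               show (PySem.Int.toStr 1).toList = ['1'] from by decide]
    split_ifs with h9
    · -- remainder 0: '1', zeros, nines
      have hz : (m-1).toNat - ((s-1)/9).toNat = (m - 1 - (s-1)/9).toNat := by omega
      rw [hz]
      simp
    · -- '1', zeros, remainder digit, nines
      have hz : (m-1).toNat - 1 - ((s-1)/9).toNat = (m - 2 - (s-1)/9).toNat := by omega
      rw [hz]
      simp

-- ===== VERDICT (by name: the statement is the Claim_ definition above) =====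
theorem minDigit_spec : Claim_equal_minDigit := by
  intro m s _ hpre
  unfold Spec_minDigit
  rcases hpre with h0 | ⟨h1, hs0, hs9⟩ | ⟨hm, hs1, hs9⟩
  · subst h0; exact pvMain0 s
  · subst h1
    interval_cases s <;> decide
  · exact pvMain2 m s hm hs1 hs9
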